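-- pv_equiv track=rewrite | github.com/awhipp/evetrade_resources | generate_jump_data.py | get_all_subsets
-- ===== SOURCE A (Python) =====
-- def get_all_subsets(arr, jump_data, jump_type):
--     '''
--     Returns all subsets of an array
--     '''
--
--     newarr = []
--
--     for idx1, arri in enumerate(jump_data):
--         if idx1 < len(jump_data) :
--             subarr = [arri]
--             for idx2, arrj in enumerate(jump_data):
--                 if idx2 > idx1:
--                     subarr.append(arrj)
--             if len(subarr) > 1:
--                 newarr.append(subarr)
--
--     for route in newarr:
--         jumps = len(route)
--         key = f'{route[0]}-{route[-1]}'
--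
--         if key not in arr:
--             arr[key] = {}
--
--         arr[key][jump_type] = jumps
--
--     return arr
-- ===== SOURCE B (Python) =====
-- def get_all_subsets(arr, jump_data, jump_type):
--     '''
--     Returns all subsets of an array
--     '''
--     n = len(jump_data)
--     if n > 1:
--         last = jump_data[-1]
--         for i in range(n - 1):
--             key = f'{jump_data[i]}-{last}'
--             inner = arr.get(key, {})
--             inner[jump_type] = n - i
--             arr[key] = inner
--     return arr
-- ===== Notes on version B (the rewrite author's own statement) =====
-- stated objective: faster
-- what changed: Replaced the O(n^2) construction of all suffix lists with a single pass over indices that computes each key from jump_data[i], jump_data[-1] and the suffix length n-i directly, never building any sublist.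
import Mathlib
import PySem

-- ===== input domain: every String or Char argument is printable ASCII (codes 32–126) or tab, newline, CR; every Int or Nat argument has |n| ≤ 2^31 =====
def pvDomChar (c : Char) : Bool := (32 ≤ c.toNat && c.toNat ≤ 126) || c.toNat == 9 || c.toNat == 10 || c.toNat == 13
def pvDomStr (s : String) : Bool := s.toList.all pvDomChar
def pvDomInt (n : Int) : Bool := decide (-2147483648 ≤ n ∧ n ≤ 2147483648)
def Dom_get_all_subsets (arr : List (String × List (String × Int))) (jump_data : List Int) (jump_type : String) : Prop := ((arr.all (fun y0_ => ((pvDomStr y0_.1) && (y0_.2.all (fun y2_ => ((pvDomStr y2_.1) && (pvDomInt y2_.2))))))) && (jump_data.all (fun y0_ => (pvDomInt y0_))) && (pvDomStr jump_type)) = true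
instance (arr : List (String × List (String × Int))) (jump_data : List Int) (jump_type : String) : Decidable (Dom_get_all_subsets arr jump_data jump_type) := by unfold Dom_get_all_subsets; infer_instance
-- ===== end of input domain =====

-- B replaces A's O(n^2) construction of all suffix lists by a single pass computing each
-- key and jump count from jump_data[i], jump_data[-1] and n-i directly (objective: faster).
-- Both Pythons mutate the dict argument `arr` in place identically; the theorems are about the return value.

-- dict lookup `d.get(k)` / `k in d`: first matching key (exact: a Python dict never has duplicate keys)
def dGet? {ν : Type} (d : List (String × ν)) (k : String) : Option ν :=
  match d with
  | [] => none
  | (k', v) :: rest => if k' == k then some v else dGet? rest k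

-- dict assignment `d[k] = v`: overwrite in place, new keys append (exact for Python dicts, as above)
def dSet {ν : Type} (d : List (String × ν)) (k : String) (v : ν) : List (String × ν) :=
  match d with
  | [] => [(k, v)]
  | (k', v') :: rest => if k' == k then (k, v) :: rest else (k', v') :: dSet rest k v

-- ===== PORT A =====
def get_all_subsets (arr : List (String × List (String × Int))) (jump_data : List Int) (jump_type : String) : List (String × List (String × Int)) :=
  let newarr := (PySem.List.enumerate jump_data).foldl (fun newarr p =>
      if p.1 < (jump_data.length : Int) then
        let subarr := (PySem.List.enumerate jump_data).foldl
          (fun subarr q => if q.1 > p.1 then subarr ++ [q.2] else subarr) [p.2]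
        if subarr.length > 1 then newarr ++ [subarr] else newarr
      else newarr) ([] : List (List Int))
  newarr.foldl (fun arr route =>
      let jumps : Int := route.length
      -- route[0] / route[-1]: route always has ≥ 2 elements, so pyGetD is exact here
      let key := PySem.Int.toStr (PySem.List.pyGetD route 0 0) ++ "-" ++
                 PySem.Int.toStr (PySem.List.pyGetD route (-1) 0)
      let arr := if (dGet? arr key).isNone then dSet arr key [] else arr
      dSet arr key (dSet ((dGet? arr key).getD []) jump_type jumps)) arr

-- ===== PORT B =====
def get_all_subsets_alt (arr : List (String × List (String × Int))) (jump_data : List Int) (jump_type : String) : List (String × List (String × Int)) :=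
  let n : Int := jump_data.length
  if n > 1 then
    let last := PySem.List.pyGetD jump_data (-1) 0   -- jump_data[-1]; nonempty here, exact
    (PySem.List.pyRange 0 (n - 1) 1).foldl (fun arr i =>
        let key := PySem.Int.toStr (PySem.List.pyGetD jump_data i 0) ++ "-" ++ PySem.Int.toStr last
        let inner := (dGet? arr key).getD []
        dSet arr key (dSet inner jump_type (n - i))) arr
  else arr

-- ===== PRECONDITION & SPEC =====
def Spec_get_all_subsets (arr : List (String × List (String × Int))) (jump_data : List Int) (jump_type : String) (out : List (String × List (String × Int))) : Prop := out = get_all_subsets_alt arr jump_data jump_type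
instance (arr : List (String × List (String × Int))) (jump_data : List Int) (jump_type : String) (out : List (String × List (String × Int))) : Decidable (Spec_get_all_subsets arr jump_data jump_type out) := by unfold Spec_get_all_subsets; infer_instance

-- ===== CLAIM (what is proved, stated in full; the proofs are below) =====
def Claim_equal_get_all_subsets : Prop := ∀ (arr : List (String × List (String × Int))) (jump_data : List Int) (jump_type : String), Dom_get_all_subsets arr jump_data jump_type → Spec_get_all_subsets arr jump_data jump_type (get_all_subsets arr jump_data jump_type)

-- ===== LEMMAS AND PROOFS =====

theorem dGet?_dSet_self {ν : Type} (d : List (String × ν)) (k : String) (v : ν) :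
    dGet? (dSet d k v) k = some v := by
  induction d with
  | nil => simp [dSet, dGet?]
  | cons p rest ih =>
    obtain ⟨k', v'⟩ := p
    by_cases h : k' == k <;> simp [dSet, dGet?, h, ih]

theorem dSet_dSet_self {ν : Type} (d : List (String × ν)) (k : String) (v w : ν) :
    dSet (dSet d k v) k w = dSet d k w := by
  induction d with
  | nil => simp [dSet]
  | cons p rest ih =>
    obtain ⟨k', v'⟩ := p
    by_cases h : k' == k <;> simp [dSet, h, ih]

-- A's two-step update (insert {} if absent, then set the inner key) equals B's one-step update
theorem updA_eq_updB (d : List (String × List (String × Int))) (key jt : String) (j : Int) :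
    (let d' := if (dGet? d key).isNone then dSet d key [] else d
     dSet d' key (dSet ((dGet? d' key).getD []) jt j)) =
    dSet d key (dSet ((dGet? d key).getD []) jt j) := by
  cases h : dGet? d key with
  | none => simp [dGet?_dSet_self, dSet_dSet_self]
  | some inner => simp [h]


theorem foldl_if_append {α β : Type} (l : List α) (c : α → Bool) (f : α → β) (init : List β) :
    l.foldl (fun acc x => if c x then acc ++ [f x] else acc) init
      = init ++ (l.filter c).map f := by
  induction l generalizing init with
  | nil => simp
  | cons x xs ih => by_cases h : c x <;> simp [h, ih]

theorem enum_filter_map_snd (xs : List Int) (s a : Int) :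
    (((PySem.List.enumerate xs s).filter (fun q => decide (a ≤ q.1))).map (·.2))
      = xs.drop (a - s).toNat := by
  induction xs generalizing s with
  | nil => simp [PySem.List.enumerate_nil]
  | cons x xs ih =>
    rw [PySem.List.enumerate_cons]
    by_cases h : a ≤ s
    · have h0 : (a - s).toNat = 0 := by omega
      have h1 : (a - (s + 1)).toNat = 0 := by omega
      simp [h, h0, ih, h1]
    · have h2 : (a - s).toNat = (a - (s + 1)).toNat + 1 := by omega
      simp [h, ih, h2]

-- the inner loop of A builds exactly the suffix starting at index p.1
theorem subarr_eq (xs : List Int) (j : Int) (x : Int) :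
    (PySem.List.enumerate xs).foldl (fun subarr q => if q.1 > j then subarr ++ [q.2] else subarr) [x]
      = x :: xs.drop (j + 1).toNat := by
  have h1 : (PySem.List.enumerate xs).foldl (fun subarr q => if q.1 > j then subarr ++ [q.2] else subarr) [x]
      = (PySem.List.enumerate xs).foldl (fun subarr q => if decide (j + 1 ≤ q.1) = true then subarr ++ [q.2] else subarr) [x] := by
    apply PySem.List.foldl_congr_mem
    intro acc q _
    by_cases h : q.1 > j
    · rw [if_pos h, if_pos (by simp; omega)]
    · rw [if_neg h, if_neg (by simp; omega)]
  rw [h1, foldl_if_append (c := fun q : Int × Int => decide (j + 1 ≤ q.1)), enum_filter_map_snd xs 0 (j + 1)]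
  simp

-- A's first loop produces exactly the length-≥2 suffixes, in order of their start index
theorem newarr_eq (xs : List Int) :
    (PySem.List.enumerate xs).foldl (fun newarr p =>
      if p.1 < (xs.length : Int) then
        let subarr := (PySem.List.enumerate xs).foldl
          (fun subarr q => if q.1 > p.1 then subarr ++ [q.2] else subarr) [p.2]
        if subarr.length > 1 then newarr ++ [subarr] else newarr
      else newarr) ([] : List (List Int))
      = (List.range (xs.length - 1)).map (fun k => xs.drop k) := by
  have hen : PySem.List.enumerate xs
      = (List.range xs.length).map (fun (k : Nat) => ((k : Int), PySem.List.pyGetD xs (k : Int) 0)) := by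
    apply List.ext_getElem?
    intro k
    by_cases hk : k < xs.length
    · simp [PySem.List.length_enumerate, hk, PySem.List.getElem_enumerate]
    · rw [List.getElem?_eq_none (by simpa [PySem.List.length_enumerate] using Nat.le_of_not_lt hk),
        List.getElem?_eq_none (by simpa using Nat.le_of_not_lt hk)]
  simp only [subarr_eq]
  rw [hen, List.foldl_map]
  have key : ∀ m, m ≤ xs.length →
      (List.range m).foldl (fun acc (k : Nat) =>
        if ((k : Int)) < (xs.length : Int) then
          let subarr := PySem.List.pyGetD xs (k : Int) 0 :: xs.drop (((k : Int)) + 1).toNat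
          if subarr.length > 1 then acc ++ [subarr] else acc
        else acc) ([] : List (List Int))
      = (List.range (min m (xs.length - 1))).map (fun k => xs.drop k) := by
    intro m hm
    induction m with
    | zero => simp
    | succ m ih =>
      rw [List.range_succ, List.foldl_append, ih (by omega)]
      have hmlt : (m : Int) < (xs.length : Int) := by omega
      have hdrop : (((m : Int)) + 1).toNat = m + 1 := by omega
      simp only [List.foldl_cons, List.foldl_nil, if_pos hmlt, hdrop]
      by_cases h2 : m < xs.length - 1
      · have hlen : (PySem.List.pyGetD xs (m : Int) 0 :: xs.drop (m + 1)).length > 1 := by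
          simp [List.length_drop]; omega
        rw [if_pos hlen]
        have hmin1 : min (m + 1) (xs.length - 1) = m + 1 := by omega
        have hmin2 : min m (xs.length - 1) = m := by omega
        have hsuffix : PySem.List.pyGetD xs (m : Int) 0 :: xs.drop (m + 1) = xs.drop m := by
          have hm' : m < xs.length := by omega
          rw [List.drop_eq_getElem_cons hm', PySem.List.pyGetD_natCast, List.getD_eq_getElem _ _ hm']
        rw [hmin1, hmin2, List.range_succ, List.map_append, hsuffix]
        simp
      · have hlen : ¬ (PySem.List.pyGetD xs (m : Int) 0 :: xs.drop (m + 1)).length > 1 := by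
          simp [List.length_drop]; omega
        rw [if_neg hlen]
        have : min (m + 1) (xs.length - 1) = min m (xs.length - 1) := by omega
        rw [this]
  have h2 : min xs.length (xs.length - 1) = xs.length - 1 := by omega
  have := key xs.length le_rfl
  rw [h2] at this
  exact this

theorem get_all_subsets_eq (arr : List (String × List (String × Int))) (xs : List Int) (jt : String) :
    get_all_subsets arr xs jt = get_all_subsets_alt arr xs jt := by
  unfold get_all_subsets get_all_subsets_alt
  rw [newarr_eq]
  by_cases hn : ((xs.length : Int) > 1)
  case neg =>
    have h0 : xs.length - 1 = 0 := by omega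
    rw [if_neg hn, h0]
    simp
  case pos =>
    rw [if_pos hn, PySem.List.pyRange_one]
    have hlen : ((xs.length : Int) - 1 - 0).toNat = xs.length - 1 := by omega
    rw [hlen, List.foldl_map, List.foldl_map]
    apply PySem.List.foldl_congr_mem
    intro d k hk
    rw [List.mem_range] at hk
    have hk1 : k < xs.length := by omega
    have hne : xs.drop k ≠ [] := by
      intro h
      have := List.drop_eq_nil_iff.mp h
      omega
    have hxne : xs ≠ [] := by
      intro h; subst h; simp at hn
    have hj : (((xs.drop k).length : Int)) = (xs.length : Int) - (0 + (k : Int)) := by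
      simp [List.length_drop]; omega
    have h0 : PySem.List.pyGetD (xs.drop k) 0 0 = PySem.List.pyGetD xs (0 + (k : Int)) 0 := by
      rw [List.drop_eq_getElem_cons hk1, PySem.List.pyGetD_zero_cons]
      simp [PySem.List.pyGetD_natCast, List.getElem?_eq_getElem hk1]
    have hlast : PySem.List.pyGetD (xs.drop k) (-1) 0 = PySem.List.pyGetD xs (-1) 0 := by
      rw [PySem.List.pyGetD_neg_one _ _ hne, PySem.List.pyGetD_neg_one _ _ hxne]
      exact List.getLast_drop hne
    simp only [hj, h0, hlast]
    exact updA_eq_updB d _ jt _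

-- ===== VERDICT (by name: the statement is the Claim_ definition above) =====
theorem get_all_subsets_spec : Claim_equal_get_all_subsets := by
  intro arr jump_data jump_type _
  unfold Spec_get_all_subsets
  exact get_all_subsets_eq arr jump_data jump_type
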